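-- pv_equiv track=rewrite | github.com/maxwendler/ACCMAPS-Features | integrity.py | verify_header
-- ===== SOURCE A (Python) =====
-- from typing import Dict, Tuple
--
-- def verify_header(header: str) -> Tuple[bool, list]:
--     cell_strs = header.split("|")
--     # find position of last non-empty cell
--     cell_idx = -1
--     for cell in cell_strs:
--         if cell == "":
--             break
--         cell_idx += 1
--     true_header_cells = cell_strs[:(cell_idx + 1)]
--     # verif. success if no empty cell / only one after the non-empty ones
--     if cell_idx == len(cell_strs) - 1:
--         return True, true_header_cells
--     # if other non-empty cell occurs: failure
--     # else: success
--     else: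
--         for empty_cell_idx in range(cell_idx + 1, len(cell_strs)):
--             cell = cell_strs[empty_cell_idx]
--             if cell != "":
--                 return False, []
--         return True, true_header_cells
-- ===== SOURCE B (Python) =====
-- def verify_header(header):
--     header_cells = []
--     seen_empty = False
--     for cell in header.split("|"):
--         if cell == "":
--             seen_empty = True
--         elif seen_empty:
--             return False, []
--         else:
--             header_cells.append(cell)
--     return True, header_cells
-- ===== Notes on version B (the rewrite author's own statement) =====
-- stated objective: simpler
-- what changed: Replaced A's two-phase logic (index scan for the first empty cell, slice for the prefix, then an index-range re-scan of the tail) by one streaming pass over the split cells with an accumulator list and a seen-empty flag.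
import Mathlib
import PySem

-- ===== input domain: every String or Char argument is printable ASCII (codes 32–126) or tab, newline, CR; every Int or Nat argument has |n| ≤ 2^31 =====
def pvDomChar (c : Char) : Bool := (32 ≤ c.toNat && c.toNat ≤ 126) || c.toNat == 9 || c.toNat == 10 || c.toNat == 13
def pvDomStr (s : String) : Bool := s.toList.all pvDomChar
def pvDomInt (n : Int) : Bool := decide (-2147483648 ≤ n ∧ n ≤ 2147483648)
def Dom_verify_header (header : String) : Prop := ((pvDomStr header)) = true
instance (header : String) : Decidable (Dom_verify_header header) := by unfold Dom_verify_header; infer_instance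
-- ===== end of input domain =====

-- B replaces A's find-first-empty / slice / re-scan-the-tail two-phase logic by one streaming
-- pass with an accumulator and a seen-empty flag (simpler; same return value everywhere).

-- ===== PORT A =====
-- first loop of A: walk the cells, incrementing cell_idx, break at the first empty cell
def vhFindIdx : List String → Int → Int
  | [], idx => idx
  | c :: rest, idx => if c = "" then idx else vhFindIdx rest (idx + 1)

-- second loop of A: for empty_cell_idx in range(cell_idx+1, len(cell_strs)): …
def vhTail (cs : List String) (cells : List String) : List Int → Bool × List String
  | [] => (true, cells)
  | i :: rest =>
    match PySem.List.pyGet? cs i with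
    | some c => if c ≠ "" then (false, []) else vhTail cs cells rest
    | none => (true, cells)  -- unreachable: every index produced by range(cell_idx+1, len) is in bounds

def verify_header (header : String) : Bool × List String :=
  -- split? is none only for sep = ""; "|" is nonempty, so getD never takes the default
  let cell_strs := (PySem.Str.split? header "|").getD []
  let cell_idx := vhFindIdx cell_strs (-1)
  let true_header_cells := PySem.List.slice cell_strs none (some (cell_idx + 1))
  if cell_idx = (cell_strs.length : Int) - 1 then (true, true_header_cells)
  else vhTail cell_strs true_header_cells (PySem.List.pyRange (cell_idx + 1) (cell_strs.length : Int) 1)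

-- ===== PORT B =====
-- B's single pass: accumulator of non-empty cells + seen-empty flag
def vhScan : List String → List String → Bool → Bool × List String
  | [], acc, _ => (true, acc)
  | c :: rest, acc, seen =>
    if c = "" then vhScan rest acc true
    else if seen then (false, [])
    else vhScan rest (acc ++ [c]) seen

def verify_header_alt (header : String) : Bool × List String :=
  -- split? is none only for sep = ""; "|" is nonempty, so getD never takes the default
  vhScan ((PySem.Str.split? header "|").getD []) [] false

-- ===== PRECONDITION & SPEC =====
def Spec_verify_header (header : String) (out : Bool × List String) : Prop := out = verify_header_alt header
instance (header : String) (out : Bool × List String) : Decidable (Spec_verify_header header out) := by unfold Spec_verify_header; infer_instance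

-- ===== CLAIM (what is proved, stated in full; the proofs are below) =====
def Claim_equal_verify_header : Prop := ∀ (header : String), Dom_verify_header header → Spec_verify_header header (verify_header header)

-- ===== LEMMAS AND PROOFS =====

theorem vhFindIdx_eq (cs : List String) (i : Int) :
    vhFindIdx cs i = i + ((cs.takeWhile (fun c => !(c == ""))).length : Int) := by
  induction cs generalizing i with
  | nil => simp [vhFindIdx]
  | cons c rest ih =>
    by_cases hc : c = "" <;> simp [vhFindIdx, hc, List.takeWhile_cons, ih] <;> ring

theorem take_length_takeWhile {α : Type} (p : α → Bool) (l : List α) :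
    l.take (l.takeWhile p).length = l.takeWhile p := by
  induction l with
  | nil => simp
  | cons a l ih =>
    by_cases h : p a <;> simp [List.takeWhile_cons, h, ih]

theorem vhTail_eq (cells : List String) : ∀ (suf pre : List String),
    vhTail (pre ++ suf) cells (PySem.List.pyRange (pre.length : Int) ((pre ++ suf).length : Int) 1)
      = if suf.all (fun c => c == "") then (true, cells) else (false, []) := by
  intro suf
  induction suf with
  | nil =>
    intro pre
    rw [PySem.List.pyRange_one_eq_nil (by simp)]
    simp [vhTail]
  | cons s suf ih =>
    intro pre
    have hlt : (pre.length : Int) < ((pre ++ s :: suf).length : Int) := by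
      have : pre.length < (pre ++ s :: suf).length := by simp
      exact_mod_cast this
    rw [PySem.List.pyRange_one_cons hlt]
    simp only [vhTail, PySem.List.pyGet?_append_length]
    by_cases hs : s = ""
    · have h1 : (pre.length : Int) + 1 = ((pre ++ [s]).length : Int) := by
        have : pre.length + 1 = (pre ++ [s]).length := by simp
        exact_mod_cast this
      have h2 : pre ++ s :: suf = (pre ++ [s]) ++ suf := by simp
      rw [if_neg (by simp [hs]), h1, h2, ih (pre ++ [s])]
      simp [hs]
    · rw [if_pos hs]
      simp [hs]

theorem vhScan_true (cs acc : List String) :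
    vhScan cs acc true = if cs.all (fun c => c == "") then (true, acc) else (false, []) := by
  induction cs generalizing acc with
  | nil => simp [vhScan]
  | cons c rest ih =>
    by_cases hc : c = "" <;> simp [vhScan, hc, ih]

theorem vhScan_false (cs acc : List String) :
    vhScan cs acc false =
      if (cs.dropWhile (fun c => !(c == ""))).all (fun c => c == "")
      then (true, acc ++ cs.takeWhile (fun c => !(c == "")))
      else (false, []) := by
  induction cs generalizing acc with
  | nil => simp [vhScan]
  | cons c rest ih =>
    by_cases hc : c = ""
    · simp [vhScan, hc, List.dropWhile_cons, List.takeWhile_cons, vhScan_true]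
    · simp [vhScan, hc, List.dropWhile_cons, List.takeWhile_cons, ih]

theorem verify_header_eq_alt (header : String) :
    verify_header header = verify_header_alt header := by
  unfold verify_header verify_header_alt
  dsimp only
  set cs := (PySem.Str.split? header "|").getD []  -- split? is none only for sep = ""; "|" is nonempty with hcs
  set tw := cs.takeWhile (fun c => !(c == "")) with htw
  have hk : vhFindIdx cs (-1) = -1 + (tw.length : Int) := vhFindIdx_eq cs (-1)
  have hle : tw.length ≤ cs.length := by
    rw [htw]; clear hk htw
    induction cs with
    | nil => simp
    | cons a l ih => by_cases h : a = "" <;> simp [h] <;> omega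
  have hslice : PySem.List.slice cs none (some (vhFindIdx cs (-1) + 1)) = tw := by
    rw [hk, show (-1 : Int) + (tw.length : Int) + 1 = (tw.length : Int) by ring,
      PySem.List.slice_to_natCast, htw]
    exact take_length_takeWhile _ cs
  rw [hslice, vhScan_false cs [], hk]
  by_cases hfull : tw.length = cs.length
  · rw [if_pos (by omega)]
    have hdw : cs.dropWhile (fun c => !(c == "")) = [] := by
      have := List.takeWhile_append_dropWhile (p := fun c => !(c == "")) (l := cs)
      have hlen := congrArg List.length this
      rw [List.length_append, ← htw] at hlen
      have hz : (cs.dropWhile (fun c => !(c == ""))).length = 0 := by omega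
      exact List.eq_nil_of_length_eq_zero hz
    simp [hdw, htw]
  · rw [if_neg (by omega)]
    have hsplit : cs = tw ++ cs.dropWhile (fun c => !(c == "")) := by
      rw [htw]; exact (List.takeWhile_append_dropWhile).symm
    have harg : (-1 : Int) + (tw.length : Int) + 1 = (tw.length : Int) := by ring
    rw [harg]
    calc vhTail cs tw (PySem.List.pyRange (tw.length : Int) (cs.length : Int) 1)
        = vhTail (tw ++ cs.dropWhile (fun c => !(c == ""))) tw
            (PySem.List.pyRange ((tw.length : Int))
              (((tw ++ cs.dropWhile (fun c => !(c == ""))).length : Int)) 1) := by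
          rw [← hsplit]
      _ = if (cs.dropWhile (fun c => !(c == ""))).all (fun c => c == "")
          then (true, tw) else (false, []) := vhTail_eq tw _ tw
      _ = _ := by rw [← htw]; simp

-- ===== VERDICT (by name: the statement is the Claim_ definition above) =====
theorem verify_header_spec : Claim_equal_verify_header := by
  intro header _
  unfold Spec_verify_header
  exact verify_header_eq_alt header
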